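-- pv_equiv track=rewrite | github.com/jarrenberg/repositorio_global | Python/EXAMEN_1_PYTHON/EXAMEN_JAA.py | encontrarLaPrimeraPalabraMasLarga
-- ===== SOURCE A (Python) =====
-- def encontrarLaPrimeraPalabraMasLarga(cadena:str)->str:
--     resultado:str
--     if len(cadena)<1:
--         resultado="No existe una palabra mas larga porque la cadena esta vacia"
--     else:
--         lista_palabras = cadena.split(" ")
--         longitudmaxima=-1
--         for palabra in lista_palabras:
--             if len(palabra)>longitudmaxima:
--                 resultado=palabra
--                 longitudmaxima=len(palabra)
--     return resultado
-- ===== SOURCE B (Python) =====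
-- def encontrarLaPrimeraPalabraMasLarga(cadena: str) -> str:
--     if len(cadena) < 1:
--         return "No existe una palabra mas larga porque la cadena esta vacia"
--     lista_palabras = cadena.split(" ")
--     return sorted(lista_palabras, key=len, reverse=True)[0]
-- ===== Notes on version B (the rewrite author's own statement) =====
-- stated objective: alternative
-- what changed: Replaces the running-maximum accumulator scan with a stable sort of the words by length in descending order followed by taking the first element; stability preserves A's first-longest tie-breaking.
import Mathlib
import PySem

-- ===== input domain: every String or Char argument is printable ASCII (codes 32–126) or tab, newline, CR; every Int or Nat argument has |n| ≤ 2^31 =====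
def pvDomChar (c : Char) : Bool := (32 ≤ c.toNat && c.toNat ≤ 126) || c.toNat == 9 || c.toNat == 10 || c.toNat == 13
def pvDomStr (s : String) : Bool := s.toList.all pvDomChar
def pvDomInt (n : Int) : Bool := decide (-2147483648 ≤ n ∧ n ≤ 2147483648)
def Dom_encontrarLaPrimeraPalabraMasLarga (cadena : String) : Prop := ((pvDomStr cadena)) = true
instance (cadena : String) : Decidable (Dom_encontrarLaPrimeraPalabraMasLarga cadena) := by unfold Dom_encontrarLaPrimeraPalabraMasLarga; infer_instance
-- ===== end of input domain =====

-- B replaces A's running-maximum scan with a stable length-descending sort and taking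
-- the first element (stability keeps A's first-longest tie-breaking); objective: alternative.

-- ===== PORT A =====
def encontrarLaPrimeraPalabraMasLarga (cadena : String) : String :=
  if PySem.Str.len cadena < 1 then
    "No existe una palabra mas larga porque la cadena esta vacia"
  else
    let lista_palabras := (PySem.Str.split? cadena " ").getD []
    -- the for-loop over (resultado, longitudmaxima); the init ("", -1) is overwritten
    -- at the first word (every length > -1), matching Python's unassigned 'resultado'
    (lista_palabras.foldl
      (fun (st : String × Int) palabra =>
        if PySem.Str.len palabra > st.2 then (palabra, PySem.Str.len palabra) else st)
      ("", -1)).1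

-- ===== PORT B =====
def encontrarLaPrimeraPalabraMasLarga_alt (cadena : String) : String :=
  if PySem.Str.len cadena < 1 then
    "No existe una palabra mas larga porque la cadena esta vacia"
  else
    -- sorted(lista_palabras, key=len, reverse=True)[0]; split(" ") is never empty,
    -- so [0] always exists — the [] branch is an unreachable totalisation default
    match PySem.List.sorted ((PySem.Str.split? cadena " ").getD [])
            (fun w => PySem.Str.len w) true with
    | w :: _ => w
    | [] => ""

-- ===== PRECONDITION & SPEC =====
def Spec_encontrarLaPrimeraPalabraMasLarga (cadena : String) (out : String) : Prop := out = encontrarLaPrimeraPalabraMasLarga_alt cadena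
instance (cadena : String) (out : String) : Decidable (Spec_encontrarLaPrimeraPalabraMasLarga cadena out) := by unfold Spec_encontrarLaPrimeraPalabraMasLarga; infer_instance

-- ===== CLAIM (what is proved, stated in full; the proofs are below) =====
def Claim_equal_encontrarLaPrimeraPalabraMasLarga : Prop := ∀ (cadena : String), Dom_encontrarLaPrimeraPalabraMasLarga cadena → Spec_encontrarLaPrimeraPalabraMasLarga cadena (encontrarLaPrimeraPalabraMasLarga cadena)

-- ===== LEMMAS AND PROOFS =====

-- head of the insertion-sort (descending by length) accumulator tracks A's running maximum
theorem pv_head_fold (ws : List String) (h : String) (t : List String) :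
    (ws.foldl (fun acc x =>
        PySem.List.insertBy (fun a b => decide (PySem.Str.len b < PySem.Str.len a)) x acc)
      (h :: t)).headD ""
    = (ws.foldl (fun (st : String × Int) palabra =>
        if PySem.Str.len palabra > st.2 then (palabra, PySem.Str.len palabra) else st)
      (h, PySem.Str.len h)).1 := by
  induction ws generalizing h t with
  | nil => rfl
  | cons x ws ih =>
    by_cases hx : PySem.Str.len h < PySem.Str.len x
    · have hd : decide (PySem.Str.len h < PySem.Str.len x) = true := decide_eq_true hx
      simp only [List.foldl_cons, PySem.List.insertBy, hd, if_true]
      rw [if_pos (show PySem.Str.len x > PySem.Str.len h from hx)]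
      exact ih x (h :: t)
    · have hd : decide (PySem.Str.len h < PySem.Str.len x) = false := decide_eq_false hx
      simp only [List.foldl_cons, PySem.List.insertBy, hd, Bool.false_eq_true, if_false]
      rw [if_neg (show ¬ PySem.Str.len x > PySem.Str.len h from hx)]
      exact ih h _

theorem pv_len_nonneg (w : String) : 0 ≤ PySem.Str.len w := by
  simp [PySem.Str.len]

-- ===== VERDICT (by name: the statement is the Claim_ definition above) =====
theorem encontrarLaPrimeraPalabraMasLarga_spec : Claim_equal_encontrarLaPrimeraPalabraMasLarga := by
  intro cadena _
  unfold Spec_encontrarLaPrimeraPalabraMasLarga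
  unfold encontrarLaPrimeraPalabraMasLarga encontrarLaPrimeraPalabraMasLarga_alt
  by_cases he : PySem.Str.len cadena < 1
  · rw [if_pos he, if_pos he]
  · rw [if_neg he, if_neg he, PySem.List.sorted_rev_eq_foldl_insertBy]
    cases hws : (PySem.Str.split? cadena " ").getD [] with
    | nil => rfl
    | cons w ws =>
      have h0 : PySem.Str.len w > (-1 : Int) := by have := pv_len_nonneg w; omega
      simp only [List.foldl_cons]
      rw [if_pos h0]
      have hmatch : forall (L : List String),
          (match L with | v :: _ => v | [] => "") = L.headD "" := by
        intro L; cases L <;> rfl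
      rw [hmatch]
      exact (pv_head_fold ws w []).symm
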